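-- pv_equiv track=rewrite | github.com/dmishin/libeuler | libeuler/ca/rle.py | parse
-- ===== SOURCE A (Python) =====
-- def parse(rle_string):
--     """ Decode the RLE string, generating sequence of the x,y pairs
--     Based on the CoffeScript code"""
--     x = 0
--     y = 0
--     curCount = 0
--     for i in range(0, len(rle_string)):
--         c = rle_string[i]
--         if "0" <= c and c <= "9":
--             curCount = curCount * 10 + int(c)
--         else:
--             count = max(curCount, 1)
--             curCount = 0
--             if c == "b":
--                 x += count
--             elif c == "$":
--                 y += count
--                 x = 0
--             elif c == "o":
--                 for j in range(0,count):
--                     yield (x, y)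
--                     x+=1
--             else:
--                 raise ValueError( "Unexpected character '%s' at position %d"%(c, i))
-- ===== SOURCE B (Python) =====
-- def parse(rle_string):
--     """Decode the RLE string, yielding (x,y) pairs of live cells.
--     Two passes: tokenize into (count, command, position) triples, then run."""
--     tokens = []
--     n = 0
--     for i, c in enumerate(rle_string):
--         if c.isdigit():
--             n = n * 10 + int(c)
--         else:
--             tokens.append((max(n, 1), c, i))
--             n = 0
--     # trailing digits with no command are ignored
--     x = 0
--     y = 0
--     for count, c, i in tokens:
--         if c == "b":
--             x += count
--         elif c == "$":
--             y += count
--             x = 0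
--         elif c == "o":
--             for _ in range(count):
--                 yield (x, y)
--                 x += 1
--         else:
--             raise ValueError("Unexpected character '%s' at position %d" % (c, i))
-- ===== Notes on version B (the rewrite author's own statement) =====
-- stated objective: idiomatic
-- what changed: B splits A's single interleaved loop into two passes: a tokenizer producing (count, command, position) triples and a separate interpreter loop over the tokens.
import Mathlib
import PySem

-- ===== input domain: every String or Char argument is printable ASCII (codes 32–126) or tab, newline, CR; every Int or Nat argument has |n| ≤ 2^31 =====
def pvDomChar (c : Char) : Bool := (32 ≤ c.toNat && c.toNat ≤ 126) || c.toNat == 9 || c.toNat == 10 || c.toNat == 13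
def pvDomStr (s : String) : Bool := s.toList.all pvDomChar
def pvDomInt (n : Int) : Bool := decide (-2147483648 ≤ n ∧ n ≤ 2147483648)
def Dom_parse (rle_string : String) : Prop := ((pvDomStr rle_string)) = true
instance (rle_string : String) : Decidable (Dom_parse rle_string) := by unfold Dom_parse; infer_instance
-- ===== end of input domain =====

-- One honest line: B re-decomposes A's single interleaved loop into a tokenize pass
-- followed by an interpreter pass over the tokens; same cost, more idiomatic.

-- ===== PORT A =====
-- the inner 'for … in range(count): yield (x,y); x+=1' loop (identical in A and B)
def emitA (x y : Int) : Nat → List (Int × Int)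
  | 0 => []
  | n+1 => (x, y) :: emitA (x+1) y n
-- A's main loop over the characters; 'none' = the ValueError branch
def parseAuxA : List Char → Int → Int → Int → List (Int × Int) → Option (List (Int × Int))
  | [], _, _, _, acc => some acc
  | c :: cs, x, y, cur, acc =>
    if '0' ≤ c ∧ c ≤ '9' then
      parseAuxA cs x y (cur * 10 + ((c.toNat : Int) - 48)) acc
    else
      let count := max cur 1
      if c = 'b' then parseAuxA cs (x + count) y 0 acc
      else if c = '$' then parseAuxA cs 0 (y + count) 0 acc
      else if c = 'o' then parseAuxA cs (x + count) y 0 (acc ++ emitA x y count.toNat)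
      else none
def parse (rle_string : String) : List (Int × Int) :=
  (parseAuxA rle_string.toList 0 0 0 []).getD []

-- ===== PORT B =====
-- pass 1: tokenize into (count, command, position) triples; trailing digits are dropped
def tokenizeB : List Char → Nat → Int → List (Int × Char × Nat)
  | [], _, _ => []
  | c :: cs, i, n =>
    if '0' ≤ c ∧ c ≤ '9' then tokenizeB cs (i+1) (n * 10 + ((c.toNat : Int) - 48))
    else (max n 1, c, i) :: tokenizeB cs (i+1) 0
-- pass 2: interpret the tokens; 'none' = the ValueError branch
def runB : List (Int × Char × Nat) → Int → Int → List (Int × Int) → Option (List (Int × Int))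
  | [], _, _, acc => some acc
  | (count, c, _) :: ts, x, y, acc =>
    if c = 'b' then runB ts (x + count) y acc
    else if c = '$' then runB ts 0 (y + count) acc
    else if c = 'o' then runB ts (x + count) y (acc ++ emitA x y count.toNat)
    else none
def parse_alt (rle_string : String) : List (Int × Int) :=
  (runB (tokenizeB rle_string.toList 0 0) 0 0 []).getD []

-- ===== PRECONDITION & SPEC =====
-- Pre_ excludes exactly the strings on which the Python A (when consumed) raises
-- ValueError: those containing a character that is neither a digit nor 'b', 'o', '$'.
def Pre_parse (rle_string : String) : Prop :=
  (rle_string.toList.all (fun c =>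
    (decide ('0' ≤ c) && decide (c ≤ '9')) || c == 'b' || c == 'o' || c == '$')) = true
instance (rle_string : String) : Decidable (Pre_parse rle_string) := by unfold Pre_parse; infer_instance
def pvWitness_parse : String := "2o$b"
def Spec_parse (rle_string : String) (out : List (Int × Int)) : Prop := out = parse_alt rle_string
instance (rle_string : String) (out : List (Int × Int)) : Decidable (Spec_parse rle_string out) := by unfold Spec_parse; infer_instance

-- ===== CLAIM (what is proved, stated in full; the proofs are below) =====
def Claim_equal_parse : Prop := ∀ (rle_string : String), Dom_parse rle_string → Pre_parse rle_string → Spec_parse rle_string (parse rle_string)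

-- ===== LEMMAS AND PROOFS =====

-- A's interleaved loop equals B's tokenize-then-run, for any state
theorem auxA_eq_runB (cs : List Char) :
    ∀ (i : Nat) (x y cur : Int) (acc : List (Int × Int)),
      parseAuxA cs x y cur acc = runB (tokenizeB cs i cur) x y acc := by
  induction cs with
  | nil => intros; rfl
  | cons c cs ih =>
    intro i x y cur acc
    by_cases h : '0' ≤ c ∧ c ≤ '9'
    · simp only [parseAuxA, tokenizeB, if_pos h]
      exact ih (i+1) x y _ acc
    · simp only [parseAuxA, tokenizeB, if_neg h, runB]
      split_ifs <;> first | rfl | exact ih (i+1) .. 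

-- ===== VERDICT (by name: the statement is the Claim_ definition above) =====
theorem parse_spec : Claim_equal_parse := by
  intro s _ _
  unfold Spec_parse parse parse_alt
  rw [auxA_eq_runB s.toList 0]
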